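-- pv_equiv track=rewrite | github.com/pc5401/my_BOJ | 백준/Platinum/1097. 마법의 문자열/마법의 문자열.py | solve
-- ===== SOURCE A (Python) =====
-- from itertools import permutations
--
-- def min_period(s: str) -> int:
--     L = len(s)
--     pi = [0] * L
--     for i in range(1, L):
--         j = pi[i - 1]
--         while j > 0 and s[i] != s[j]:
--             j = pi[j - 1]
--         if s[i] == s[j]:
--             j += 1
--         pi[i] = j
--     p = L - pi[-1]
--     return p if L % p == 0 else L
--
-- def solve(N, words, K):
--     L = sum(len(w) for w in words)
--     if K == 0 or K > L or L % K != 0: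
--         return 0
--     ans = 0
--     for perm in permutations(range(N)):
--         T = ''.join(words[i] for i in perm)
--         p = min_period(T)
--         if L // p == K:
--             ans += 1
--     return ans
-- ===== SOURCE B (Python) =====
-- from itertools import permutations
--
-- def solve(N, words, K):
--     L = sum(len(w) for w in words)
--     if K == 0 or K > L or L % K != 0:
--         return 0
--     ans = 0
--     for perm in permutations(range(N)):
--         T = ''.join(words[i] for i in perm)
--         p = (T + T).index(T, 1)   # smallest rotation offset = min period if it divides len(T), else len(T)
--         if L // p == K:
--             ans += 1
--     return ans
-- ===== Notes on version B (the rewrite author's own statement) =====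
-- stated objective: alternative
-- what changed: B replaces A's KMP failure-function period computation (min_period) by the string-doubling trick: the smallest offset r >= 1 at which T occurs in T+T equals min_period(T) (the minimal period when it divides len(T), else len(T)), so the whole pi-table construction disappears.
import Mathlib
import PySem

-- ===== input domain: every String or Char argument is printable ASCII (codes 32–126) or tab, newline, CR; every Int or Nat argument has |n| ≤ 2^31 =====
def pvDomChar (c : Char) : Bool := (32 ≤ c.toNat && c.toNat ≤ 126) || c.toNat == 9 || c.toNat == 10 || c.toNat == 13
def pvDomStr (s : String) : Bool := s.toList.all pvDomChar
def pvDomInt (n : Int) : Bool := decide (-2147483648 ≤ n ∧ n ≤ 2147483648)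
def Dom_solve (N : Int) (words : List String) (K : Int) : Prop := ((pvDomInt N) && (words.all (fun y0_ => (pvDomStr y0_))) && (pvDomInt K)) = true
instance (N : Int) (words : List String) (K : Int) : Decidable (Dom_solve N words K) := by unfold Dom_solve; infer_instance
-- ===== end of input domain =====

-- B replaces A's KMP failure-function period computation by the string-doubling test
-- p = (T+T).index(T, 1); same return value everywhere A returns.

-- ===== PORT A =====
-- `while j > 0 and s[i] != s[j]: j = pi[j-1]` — fuel recursion; fuel = len(s) suffices because
-- every stored pi value satisfies pi[t] ≤ t, so j strictly decreases each iteration.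
def kmpWhile (s : List Char) (pi : List Int) (ci : Char) : Nat → Int → Int
  | 0, j => j
  | fuel + 1, j =>
    if j > 0 && !(ci == PySem.List.pyGetD s j ' ') then
      kmpWhile s pi ci fuel (PySem.List.pyGetD pi (j - 1) 0)
    else j

-- min_period of A (KMP failure function).
def minPeriod (s : List Char) : Int :=
  let L := s.length
  let pi := (PySem.List.pyRange 1 (L : Int) 1).foldl (fun pi i =>
      let j := PySem.List.pyGetD pi (i - 1) 0
      let j := kmpWhile s pi (PySem.List.pyGetD s i ' ') L j
      let j := if PySem.List.pyGetD s i ' ' == PySem.List.pyGetD s j ' ' then j + 1 else j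
      PySem.List.pySetD pi i j)
    (List.replicate L (0 : Int))
  let p := (L : Int) - PySem.List.pyGetD pi (-1) 0
  if PySem.Int.mod (L : Int) p == 0 then p else (L : Int)

-- ''.join(words[i] for i in perm) — identical expression in Source A and Source B.
def joinWords (words : List String) (perm : List Int) : List Char :=
  (perm.map (fun i => (PySem.List.pyGetD words i "").toList)).flatten

def solve (N : Int) (words : List String) (K : Int) : Int :=
  let L : Int := (words.map (fun w => PySem.Str.len w)).sum
  if K == 0 || decide (L < K) || !(PySem.Int.mod L K == 0) then 0
  else
    (PySem.List.permutations (PySem.List.pyRange 0 N 1)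
        (PySem.List.pyRange 0 N 1).length).foldl
      (fun ans perm =>
        if PySem.Int.floordiv L (minPeriod (joinWords words perm)) == K then ans + 1 else ans)
      0

-- ===== PORT B =====
def solve_alt (N : Int) (words : List String) (K : Int) : Int :=
  let L : Int := (words.map (fun w => PySem.Str.len w)).sum
  if K == 0 || decide (L < K) || !(PySem.Int.mod L K == 0) then 0
  else
    (PySem.List.permutations (PySem.List.pyRange 0 N 1)
        (PySem.List.pyRange 0 N 1).length).foldl
      (fun ans perm =>
        let T := joinWords words perm
        -- p = (T + T).index(T, 1); str.index = find + raise ValueError on -1.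
        let p := PySem.Chars.findFrom (T ++ T) T 1
        if p == -1 then ans  -- the raise; unreachable under Pre_ (T is nonempty there)
        else if PySem.Int.floordiv L p == K then ans + 1 else ans)
      0

-- ===== PRECONDITION & SPEC =====
-- Pre_ excludes exactly the inputs where the Python A raises: when the initial guard does not
-- return 0, A raises IndexError unless 0 ≤ N ≤ len(words) (words[i]) and the words joined by a
-- permutation are non-empty (pi[-1] in min_period on the empty string).
def Pre_solve (N : Int) (words : List String) (K : Int) : Prop :=
  let L : Int := (words.map (fun w => PySem.Str.len w)).sum
  (K = 0 ∨ L < K ∨ PySem.Int.mod L K ≠ 0) ∨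
    (0 ≤ N ∧ N ≤ (words.length : Int) ∧
      0 < ((words.take N.toNat).map (fun w => PySem.Str.len w)).sum)
instance (N : Int) (words : List String) (K : Int) : Decidable (Pre_solve N words K) := by
  unfold Pre_solve; infer_instance

def pvWitness_solve : Int × List String × Int := (2, ["ab", "ab"], 2)

def Spec_solve (N : Int) (words : List String) (K : Int) (out : Int) : Prop := out = solve_alt N words K
instance (N : Int) (words : List String) (K : Int) (out : Int) : Decidable (Spec_solve N words K out) := by unfold Spec_solve; infer_instance

-- ===== CLAIM (what is proved, stated in full; the proofs are below) =====
def Claim_equal_solve : Prop := ∀ (N : Int) (words : List String) (K : Int), Dom_solve N words K → Pre_solve N words K → Spec_solve N words K (solve N words K)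

-- ===== LEMMAS AND PROOFS =====

-- s[i] with a default, as the proofs index strings.
def sGet (s : List Char) (i : Nat) : Char := s.getD i ' '

-- d is a period of s.
def PerN (s : List Char) (d : Nat) : Prop := ∀ i, i + d < s.length → sGet s i = sGet s (i + d)

-- s is fixed by rotation by r.
def RotN (s : List Char) (r : Nat) : Prop := ∀ i, i < s.length → sGet s i = sGet s ((i + r) % s.length)

-- j is the length of a (proper) border of the prefix of length m of s.
def BorderN (s : List Char) (m j : Nat) : Prop := j < m ∧ ∀ i, i < j → sGet s i = sGet s (m - j + i)

def borderB (s : List Char) (m j : Nat) : Bool :=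
  decide (j < m) && (List.range j).all (fun i => sGet s i == sGet s (m - j + i))

-- length of the longest border of the prefix of length m (maxb = pi[m-1] of KMP).
def maxb (s : List Char) (m : Nat) : Nat := Nat.findGreatest (fun j => borderB s m j = true) (m - 1)

-- n - maxb n: the minimal period of s.
def minp (s : List Char) : Nat := s.length - maxb s s.length

theorem pyGetD_neg_one {α : Type} (xs : List α) (d : α) (h : 1 ≤ xs.length) :
    PySem.List.pyGetD xs (-1) d = xs.getD (xs.length - 1) d := by
  simp only [PySem.List.pyGetD, PySem.List.pyGet?, PySem.List.pyIdx?]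
  rw [if_neg (by omega), if_pos (by omega)]
  simp only [Option.bind_some]
  have e : (-(-1) : Int).toNat = 1 := by decide
  rw [e]
  have hlt : xs.length - 1 < xs.length := by omega
  rw [List.getD_eq_getElem xs d hlt, List.getElem?_eq_getElem hlt]
  rfl

theorem pyGetD_sGet (s : List Char) (j : Nat) :
    PySem.List.pyGetD s ((j : Nat) : Int) ' ' = sGet s j := by
  rw [PySem.List.pyGetD_natCast]; rfl

theorem borderB_iff (s : List Char) (m j : Nat) : borderB s m j = true ↔ BorderN s m j := by
  simp [borderB, BorderN, List.all_eq_true, List.mem_range]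

theorem border_zero (s : List Char) (m : Nat) (h : 0 < m) : BorderN s m 0 := ⟨h, by omega⟩

theorem maxb_le (s : List Char) (m : Nat) : maxb s m ≤ m - 1 := Nat.findGreatest_le _

theorem maxb_border (s : List Char) (m : Nat) (h : 0 < m) : BorderN s m (maxb s m) := by
  have h0 : borderB s m 0 = true := (borderB_iff s m 0).2 (border_zero s m h)
  have := Nat.findGreatest_spec (P := fun j => borderB s m j = true) (n := m - 1) (Nat.zero_le _) h0
  exact (borderB_iff s m _).1 this

theorem le_maxb (s : List Char) (m j : Nat) (hj : BorderN s m j) : j ≤ maxb s m := by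
  have hjm : j ≤ m - 1 := by have := hj.1; omega
  exact Nat.le_findGreatest hjm ((borderB_iff s m j).2 hj)

-- border of a border is a border
theorem border_lift (s : List Char) (m b j : Nat) (hb : BorderN s m b) (hj : BorderN s b j) :
    BorderN s m j := by
  obtain ⟨hbm, Hb⟩ := hb
  obtain ⟨hjb, Hj⟩ := hj
  refine ⟨by omega, fun i hij => ?_⟩
  have e : m - b + (b - j + i) = m - j + i := by omega
  calc sGet s i = sGet s (b - j + i) := Hj i hij
    _ = sGet s (m - b + (b - j + i)) := Hb _ (by omega)
    _ = sGet s (m - j + i) := by rw [e]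

-- a smaller border is a border of any larger border
theorem border_of_border_lt (s : List Char) (m b j : Nat) (hb : BorderN s m b)
    (hj : BorderN s m j) (hlt : j < b) : BorderN s b j := by
  obtain ⟨hbm, Hb⟩ := hb
  obtain ⟨hjm, Hj⟩ := hj
  refine ⟨hlt, fun i hij => ?_⟩
  have e : m - b + (b - j + i) = m - j + i := by omega
  calc sGet s i = sGet s (m - j + i) := Hj i hij
    _ = sGet s (m - b + (b - j + i)) := by rw [e]
    _ = sGet s (b - j + i) := (Hb _ (by omega)).symm

-- extending a border by one matching character
theorem border_succ_iff (s : List Char) (i j : Nat) (hi : 0 < i) (hin : i < s.length) :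
    BorderN s (i + 1) (j + 1) ↔ (BorderN s i j ∧ sGet s i = sGet s j) := by
  constructor
  · rintro ⟨hjm, H⟩
    have hj : j < i := by omega
    refine ⟨⟨hj, fun i' hi' => ?_⟩, ?_⟩
    · have := H i' (by omega)
      have e : i + 1 - (j + 1) + i' = i - j + i' := by omega
      rwa [e] at this
    · have := H j (by omega)
      have e : i + 1 - (j + 1) + j = i := by omega
      rw [e] at this
      exact this.symm
  · rintro ⟨⟨hj, H⟩, hm⟩
    refine ⟨by omega, fun i' hi' => ?_⟩
    rcases Nat.lt_or_ge i' j with h' | h'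
    · have := H i' h'
      have e : i + 1 - (j + 1) + i' = i - j + i' := by omega
      rwa [e]
    · have e1 : i' = j := by omega
      have e : i + 1 - (j + 1) + j = i := by omega
      rw [e1, e]
      exact hm.symm

-- the while loop of KMP: descends the border chain of prefix i
theorem kmpWhile_spec (s : List Char) (pi : List Int) (i : Nat) (hi : 1 ≤ i) (hin : i < s.length)
    (Hpi : ∀ t, t < i → PySem.List.pyGetD pi (t : Int) 0 = (maxb s (t + 1) : Int)) :
    ∀ fuel (j : Nat), j ≤ fuel → (j = 0 ∨ BorderN s i j) →
    ∃ r : Nat, kmpWhile s pi (sGet s i) fuel (j : Int) = (r : Int) ∧ r ≤ j ∧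
      (r = 0 ∨ BorderN s i r) ∧
      (sGet s i ≠ sGet s r → r = 0) ∧
      (∀ t, BorderN s i t → t ≤ j → sGet s i = sGet s t → t ≤ r) := by
  intro fuel
  induction fuel with
  | zero =>
    intro j hj hB
    have hj0 : j = 0 := by omega
    subst hj0
    exact ⟨0, rfl, le_refl _, Or.inl rfl, fun _ => rfl, fun t _ ht _ => by omega⟩
  | succ fuel ih =>
    intro j hj hB
    simp only [kmpWhile]
    by_cases hcond : (((j : Int) > 0 : Bool) && !(sGet s i == PySem.List.pyGetD s (j : Int) ' ')) = true
    · rw [if_pos hcond]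
      simp only [Bool.and_eq_true, Bool.not_eq_true', beq_eq_false_iff_ne, decide_eq_true_eq,
        pyGetD_sGet] at hcond
      obtain ⟨hjgt, hne⟩ := hcond
      have hjpos : 1 ≤ j := by exact_mod_cast Int.lt_iff_add_one_le.mp hjgt
      have hBj : BorderN s i j := (hB.resolve_left (by omega))
      have hj_lt_i : j < i := hBj.1
      have hgetpi : PySem.List.pyGetD pi ((j : Int) - 1) 0 = (maxb s j : Int) := by
        have e : ((j : Int) - 1) = ((j - 1 : Nat) : Int) := by push_cast; omega
        rw [e, Hpi (j - 1) (by omega)]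
        congr 2
        omega
      have hj'lt : maxb s j < j := by
        have := maxb_le s j
        omega
      have hB' : maxb s j = 0 ∨ BorderN s i (maxb s j) := by
        rcases Nat.eq_zero_or_pos (maxb s j) with h0 | hpos
        · exact Or.inl h0
        · exact Or.inr (border_lift s i j (maxb s j) hBj (maxb_border s j (by omega)))
      obtain ⟨r, hrec, hr_le, hrB, hrne, hrmax⟩ := ih (maxb s j) (by omega) hB'
      refine ⟨r, ?_, by omega, hrB, hrne, ?_⟩
      · rw [hgetpi]; exact hrec
      · intro t htB htj htc
        have htj' : t ≤ maxb s j := by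
          have hne_t : t ≠ j := fun e => hne (e ▸ htc)
          rcases Nat.eq_zero_or_pos t with h0 | hpos
          · omega
          · exact le_maxb s j t (border_of_border_lt s i j t hBj htB (by omega))
        exact hrmax t htB htj' htc
    · rw [if_neg hcond]
      simp only [Bool.and_eq_true, Bool.not_eq_true', beq_eq_false_iff_ne, decide_eq_true_eq,
        pyGetD_sGet, not_and, not_not] at hcond
      refine ⟨j, rfl, le_refl _, hB, ?_, fun t _ ht _ => ht⟩
      intro hne
      by_contra hj0
      have hjgt : (0 : Int) < (j : Int) := by
        have : 0 < j := Nat.pos_of_ne_zero hj0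
        exact_mod_cast this
      exact hne (hcond hjgt)

-- one KMP step computes maxb s (i+1)
theorem kmpStep (s : List Char) (pi : List Int) (i : Nat) (hi : 1 ≤ i) (hin : i < s.length)
    (hlen : pi.length = s.length)
    (Hpi : ∀ t, t < i → PySem.List.pyGetD pi (t : Int) 0 = (maxb s (t + 1) : Int)) :
    let j0 := PySem.List.pyGetD pi ((i : Int) - 1) 0
    let j1 := kmpWhile s pi (PySem.List.pyGetD s (i : Int) ' ') s.length j0
    let j2 := if PySem.List.pyGetD s (i : Int) ' ' == PySem.List.pyGetD s j1 ' ' then j1 + 1 else j1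
    j2 = (maxb s (i + 1) : Int) := by
  dsimp only
  have hj0 : PySem.List.pyGetD pi ((i : Int) - 1) 0 = (maxb s i : Int) := by
    have e : ((i : Int) - 1) = ((i - 1 : Nat) : Int) := by push_cast; omega
    rw [e, Hpi (i - 1) (by omega)]
    congr 2
    omega
  rw [hj0, pyGetD_sGet s i]
  have hB : maxb s i = 0 ∨ BorderN s i (maxb s i) := by
    rcases Nat.eq_zero_or_pos (maxb s i) with h0 | hpos
    · exact Or.inl h0
    · exact Or.inr (maxb_border s i (by omega))
  obtain ⟨r, hrec, hrle, hrB, hrne, hrmax⟩ :=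
    kmpWhile_spec s pi i hi hin Hpi s.length (maxb s i)
      (by have := maxb_le s i; omega) hB
  rw [hrec, pyGetD_sGet s r]
  have hBr : BorderN s i r := by
    rcases hrB with h0 | hb
    · subst h0; exact border_zero s i (by omega)
    · exact hb
  by_cases heq : sGet s i = sGet s r
  · rw [if_pos (beq_iff_eq.mpr heq)]
    have hb1 : BorderN s (i + 1) (r + 1) := (border_succ_iff s i r (by omega) hin).2 ⟨hBr, heq⟩
    have hlb : r + 1 ≤ maxb s (i + 1) := le_maxb s (i + 1) (r + 1) hb1
    have hub : maxb s (i + 1) ≤ r + 1 := by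
      rcases Nat.eq_zero_or_pos (maxb s (i + 1)) with h0 | hpos
      · omega
      · have hbB := maxb_border s (i + 1) (by omega)
        have e : maxb s (i + 1) - 1 + 1 = maxb s (i + 1) := Nat.sub_add_cancel hpos
        rw [← e] at hbB
        obtain ⟨hB2, hc2⟩ := (border_succ_iff s i (maxb s (i + 1) - 1) (by omega) hin).1 hbB
        have h3 : maxb s (i + 1) - 1 ≤ maxb s i := le_maxb s i _ hB2
        have h4 := hrmax (maxb s (i + 1) - 1) hB2 h3 hc2
        omega
    have : maxb s (i + 1) = r + 1 := by omega
    rw [this]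
    push_cast
    ring
  · rw [if_neg (by simp [heq])]
    have hr0 : r = 0 := hrne heq
    have hm0 : maxb s (i + 1) = 0 := by
      by_contra h0
      have hpos : 0 < maxb s (i + 1) := Nat.pos_of_ne_zero h0
      have hbB := maxb_border s (i + 1) (by omega)
      have e : maxb s (i + 1) - 1 + 1 = maxb s (i + 1) := Nat.sub_add_cancel hpos
      rw [← e] at hbB
      obtain ⟨hB2, hc2⟩ := (border_succ_iff s i (maxb s (i + 1) - 1) (by omega) hin).1 hbB
      have h3 : maxb s (i + 1) - 1 ≤ maxb s i := le_maxb s i _ hB2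
      have h4 := hrmax (maxb s (i + 1) - 1) hB2 h3 hc2
      have h5 : maxb s (i + 1) - 1 = r := by omega
      rw [h5] at hc2
      exact heq hc2
    rw [hm0, hr0]

-- the fold builds the whole failure table
theorem kmpFold (s : List Char) (hn : 1 ≤ s.length) : ∀ m, 1 ≤ m → m ≤ s.length →
    (((PySem.List.pyRange 1 (m : Int) 1).foldl (fun pi i =>
      let j := PySem.List.pyGetD pi (i - 1) 0
      let j := kmpWhile s pi (PySem.List.pyGetD s i ' ') s.length j
      let j := if PySem.List.pyGetD s i ' ' == PySem.List.pyGetD s j ' ' then j + 1 else j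
      PySem.List.pySetD pi i j)
      (List.replicate s.length (0 : Int))).length = s.length ∧
    ∀ t, t < m → PySem.List.pyGetD ((PySem.List.pyRange 1 (m : Int) 1).foldl (fun pi i =>
      let j := PySem.List.pyGetD pi (i - 1) 0
      let j := kmpWhile s pi (PySem.List.pyGetD s i ' ') s.length j
      let j := if PySem.List.pyGetD s i ' ' == PySem.List.pyGetD s j ' ' then j + 1 else j
      PySem.List.pySetD pi i j)
      (List.replicate s.length (0 : Int))) (t : Int) 0 = (maxb s (t + 1) : Int)) := by
  intro m
  induction m with
  | zero => intro h; omega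
  | succ m ih =>
    intro h1 hle
    rcases Nat.eq_zero_or_pos m with h0 | hm
    · subst h0
      rw [PySem.List.pyRange_one_eq_nil (by norm_num)]
      simp only [List.foldl_nil]
      refine ⟨by simp, fun t ht => ?_⟩
      have ht0 : t = 0 := by omega
      subst ht0
      rw [PySem.List.pyGetD_natCast]
      have hm1 : maxb s 1 = 0 := Nat.findGreatest_zero
      rw [hm1]
      have hlt : (0 : ℕ) < (List.replicate s.length (0 : Int)).length := by simp; omega
      rw [List.getD_eq_getElem _ _ hlt]
      simp
    · have ihm := ih (by omega) (by omega)
      have hsplit : PySem.List.pyRange 1 ((m + 1 : Nat) : Int) 1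
          = PySem.List.pyRange 1 (m : Int) 1 ++ [(m : Int)] := by
        have h2 := PySem.List.pyRange_one_succ_right (a := 1) (b := (m : Int)) (by exact_mod_cast hm)
        push_cast
        exact h2
      rw [hsplit, List.foldl_append] at *
      obtain ⟨hlen, hvals⟩ := ihm
      simp only [List.foldl_cons, List.foldl_nil]
      have hstep := kmpStep s _ m hm (by omega) hlen hvals
      dsimp only at hstep ⊢
      constructor
      · rw [PySem.List.pySetD_natCast, List.length_set]
        exact hlen
      · intro t htlt
        rw [PySem.List.pyGetD_pySetD_natCast _ m t _ 0 (by rw [hlen]; omega)]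
        rcases Nat.lt_or_ge t m with hlt | hge
        · rw [if_neg (by omega)]
          exact hvals t hlt
        · have : t = m := by omega
          subst this
          rw [if_pos rfl, ← hstep]

theorem minPeriod_eq_minp (s : List Char) (h : s ≠ []) :
    minPeriod s = if minp s ∣ s.length then (minp s : Int) else (s.length : Int) := by
  have hn : 1 ≤ s.length := List.length_pos_of_ne_nil h
  obtain ⟨hlen, hvals⟩ := kmpFold s hn s.length hn (le_refl _)
  unfold minPeriod
  dsimp only
  rw [pyGetD_neg_one _ _ (by rw [hlen]; omega), hlen]
  have hv := hvals (s.length - 1) (by omega)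
  rw [PySem.List.pyGetD_natCast] at hv
  rw [show s.length - 1 + 1 = s.length by omega] at hv
  rw [hv]
  have hp : (s.length : Int) - (maxb s s.length : Int) = (minp s : Int) := by
    have := maxb_le s s.length
    unfold minp
    push_cast
    omega
  rw [hp]
  by_cases hdvd : minp s ∣ s.length
  · rw [if_pos hdvd]
    have hmod : PySem.Int.mod (s.length : Int) (minp s : Int) = 0 :=
      (PySem.Int.mod_eq_zero_iff_dvd _ _).2 (Int.natCast_dvd_natCast.2 hdvd)
    rw [hmod]
    simp
  · rw [if_neg hdvd]
    have hmod : PySem.Int.mod (s.length : Int) (minp s : Int) ≠ 0 := fun hc =>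
      hdvd (Int.natCast_dvd_natCast.1 ((PySem.Int.mod_eq_zero_iff_dvd _ _).1 hc))
    have hbeq : (PySem.Int.mod (s.length : Int) (minp s : Int) == 0) = false :=
      beq_eq_false_iff_ne.mpr hmod
    rw [hbeq]
    simp

-- ==== period theory ====

theorem sGet_congr (s : List Char) {i j : Nat} (h : i = j) : sGet s i = sGet s j := by rw [h]

theorem perN_sub (s : List Char) (p q : Nat) (hpq : p ≤ q)
    (hp : PerN s p) (hqq : PerN s q) (hsum : p + q ≤ s.length) : PerN s (q - p) := by
  intro i hilt
  rcases Nat.lt_or_ge (i + q) s.length with hlt | hge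
  · calc sGet s i = sGet s (i + q) := hqq i hlt
      _ = sGet s (i + (q - p) + p) := sGet_congr s (by omega)
      _ = sGet s (i + (q - p)) := (hp (i + (q - p)) (by omega)).symm
  · have hip : p ≤ i := by omega
    calc sGet s i = sGet s (i - p + p) := sGet_congr s (by omega)
      _ = sGet s (i - p) := (hp (i - p) (by omega)).symm
      _ = sGet s (i - p + q) := hqq (i - p) (by omega)
      _ = sGet s (i + (q - p)) := sGet_congr s (by omega)

theorem perN_gcd (s : List Char) (p q : Nat) (hsum : p + q ≤ s.length)
    (hp : PerN s p) (hq : PerN s q) : PerN s (Nat.gcd p q) := by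
  have main : ∀ m p q, p + q ≤ m → p + q ≤ s.length → PerN s p → PerN s q →
      PerN s (Nat.gcd p q) := by
    intro m
    induction m using Nat.strong_induction_on with
    | _ m ih =>
      intro p q hm hn hp hq
      rcases Nat.eq_zero_or_pos p with hp0 | hppos
      · subst hp0; simpa using hq
      rcases Nat.eq_zero_or_pos q with hq0 | hqpos
      · subst hq0; simpa using hp
      rcases Nat.le_total p q with hle | hle
      · have hsub := perN_sub s p q hle hp hq hn
        have hg : Nat.gcd p (q - p) = Nat.gcd p q := Nat.gcd_sub_self_right hle
        rw [← hg]
        exact ih q (by omega) p (q - p) (by omega) (by omega) hp hsub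
      · have hsub := perN_sub s q p hle hq hp (by omega)
        have hg : Nat.gcd q (p - q) = Nat.gcd q p := Nat.gcd_sub_self_right hle
        rw [Nat.gcd_comm, ← hg]
        exact ih p (by omega) q (p - q) (by omega) (by omega) hq hsub
  exact main (p + q) p q (le_refl _) hsum hp hq

-- borders of the whole string are exactly periods
theorem border_top_per (s : List Char) (j : Nat) (h : BorderN s s.length j) :
    PerN s (s.length - j) := by
  obtain ⟨hj, H⟩ := h
  intro i hilt
  have hij : i < j := by omega
  calc sGet s i = sGet s (s.length - j + i) := H i hij
    _ = sGet s (i + (s.length - j)) := sGet_congr s (by omega)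

theorem per_border_top (s : List Char) (d : Nat) (hd : 0 < d) (hdn : d < s.length)
    (h : PerN s d) : BorderN s s.length (s.length - d) := by
  refine ⟨by omega, fun i hi => ?_⟩
  calc sGet s i = sGet s (i + d) := h i (by omega)
    _ = sGet s (s.length - (s.length - d) + i) := sGet_congr s (by omega)

theorem minp_per (s : List Char) : PerN s (minp s) := by
  rcases Nat.eq_zero_or_pos s.length with h0 | hpos
  · intro i hi; omega
  · have hb := maxb_border s s.length hpos
    exact border_top_per s (maxb s s.length) hb

theorem minp_min (s : List Char) (d : Nat) (hd : 0 < d) (hdn : d < s.length) (h : PerN s d) :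
    minp s ≤ d := by
  have hb := per_border_top s d hd hdn h
  have := le_maxb s s.length _ hb
  unfold minp
  omega

theorem minp_pos (s : List Char) (h : s ≠ []) : 0 < minp s := by
  have hn : 0 < s.length := List.length_pos_of_ne_nil h
  have := maxb_le s s.length
  unfold minp
  omega

theorem minp_le (s : List Char) : minp s ≤ s.length := Nat.sub_le _ _

theorem rotN_congr_mod (s : List Char) {r r' : Nat} (h : r % s.length = r' % s.length) :
    RotN s r ↔ RotN s r' := by
  have key : ∀ i, (i + r) % s.length = (i + r') % s.length := by
    intro i
    rw [Nat.add_mod, Nat.add_mod i r', h]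
  constructor <;> intro H i hi
  · rw [← key i]; exact H i hi
  · rw [key i]; exact H i hi

theorem rotN_add (s : List Char) {a b : Nat} (ha : RotN s a) (hb : RotN s b) :
    RotN s (a + b) := by
  intro i hi
  have h1 := ha i hi
  have h2 := hb ((i + a) % s.length) (Nat.mod_lt _ (by omega))
  rw [h1, h2]
  apply sGet_congr
  rw [Nat.mod_add_mod, Nat.add_assoc]

theorem rotN_zero (s : List Char) : RotN s 0 := by
  intro i hi
  apply sGet_congr
  rw [Nat.add_zero, Nat.mod_eq_of_lt hi]

theorem rotN_mul (s : List Char) (r : Nat) (h : RotN s r) : ∀ k, RotN s (k * r) := by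
  intro k
  induction k with
  | zero => simpa using rotN_zero s
  | succ k ih =>
    have := rotN_add s ih h
    rwa [Nat.succ_mul]

theorem rot_gcd (s : List Char) (r : Nat) (hn : 0 < s.length) (hr : 0 < r) (h : RotN s r) :
    PerN s (Nat.gcd r s.length) := by
  set n := s.length with hndef
  -- Bezout: some multiple of r is ≡ gcd r n (mod n)
  have key : ∃ k : Nat, (k * r) % n = (Nat.gcd r n) % n := by
    have hb := Nat.gcd_eq_gcd_ab r n
    set a := Nat.gcdA r n with hadef
    refine ⟨(a % (n : ℤ)).toNat, ?_⟩
    have hnz : (0 : ℤ) < (n : ℤ) := by exact_mod_cast hn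
    have hk : (((a % (n : ℤ)).toNat : ℕ) : ℤ) = a % (n : ℤ) :=
      Int.toNat_of_nonneg (Int.emod_nonneg a (by omega))
    have hcast : (((a % (n : ℤ)).toNat * r : ℕ) : ℤ) % (n : ℤ) = ((Nat.gcd r n : ℕ) : ℤ) % (n : ℤ) := by
      push_cast [hk]
      calc (a % (n : ℤ) * (r : ℤ)) % (n : ℤ) = (a * (r : ℤ)) % (n : ℤ) := by
            rw [Int.mul_emod, Int.emod_emod_of_dvd _ (dvd_refl _), ← Int.mul_emod]
        _ = ((Nat.gcd r n : ℤ) - (n : ℤ) * Nat.gcdB r n) % (n : ℤ) := by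
            congr 1; rw [hb]; ring
        _ = ((Nat.gcd r n : ℤ)) % (n : ℤ) := by
            rw [Int.sub_mul_emod_self_left]
    have := hcast
    rw [← Int.natCast_mod, ← Int.natCast_mod] at this
    exact_mod_cast this
  obtain ⟨k, hk⟩ := key
  have hrot : RotN s (Nat.gcd r n) := by
    have h1 := rotN_mul s r h k
    exact ((rotN_congr_mod s (by rw [hndef] at hk ⊢; exact hk)).1 h1)
  intro i hi
  have := hrot i (by omega)
  rw [this]
  apply sGet_congr
  exact Nat.mod_eq_of_lt (by omega)

theorem per_mod_idx (s : List Char) (d : Nat) (hd : 0 < d) (h : PerN s d) :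
    ∀ i, i < s.length → sGet s i = sGet s (i % d) := by
  intro i
  induction i using Nat.strong_induction_on with
  | _ i ih =>
    intro hi
    rcases Nat.lt_or_ge i d with hlt | hge
    · apply sGet_congr; rw [Nat.mod_eq_of_lt hlt]
    · have h1 : sGet s (i - d) = sGet s i := by
        have := h (i - d) (by omega)
        rw [this]; apply sGet_congr; omega
      have h2 := ih (i - d) (by omega) (by omega)
      rw [← h1, h2]
      apply sGet_congr
      conv_rhs => rw [show i = i - d + d by omega]
      rw [Nat.add_mod_right]

theorem rot_of_per_dvd (s : List Char) (d : Nat) (hd : 0 < d) (hdvd : d ∣ s.length)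
    (h : PerN s d) : RotN s d := by
  intro i hi
  have hdn : d ≤ s.length := Nat.le_of_dvd (by omega) hdvd
  rcases Nat.lt_or_ge (i + d) s.length with hlt | hge
  · rw [Nat.mod_eq_of_lt hlt]
    exact h i hlt
  · have hmod : (i + d) % s.length = i + d - s.length := by
      rw [Nat.mod_eq_sub_mod hge, Nat.mod_eq_of_lt (by omega)]
    rw [hmod]
    obtain ⟨c, hc⟩ := hdvd
    have e1 := per_mod_idx s d hd h i hi
    have e2 := per_mod_idx s d hd h (i + d - s.length) (by omega)
    rw [e1, e2]
    apply sGet_congr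
    conv_lhs => rw [show i = (i + d - s.length) + s.length - d by omega]
    rw [show (i + d - s.length) + s.length - d = (i + d - s.length) + (s.length - d) by omega]
    rw [hc, show d * c - d = d * (c - 1) by rw [Nat.mul_sub, Nat.mul_one], Nat.add_mul_mod_self_left]

theorem prefix_drop_iff_rot (s : List Char) (r : Nat) (hn : 0 < s.length) (hr : r ≤ s.length) :
    s <+: (s ++ s).drop r ↔ RotN s r := by
  set n := s.length with hndef
  have hlen : ((s ++ s).drop r).length = 2 * n - r := by
    simp [hndef]; omega
  have elt : ∀ i (hi : i < n), ((s ++ s).drop r)[i]'(by omega) = sGet s ((i + r) % n) := by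
    intro i hi
    rw [List.getElem_drop]
    rw [List.getElem_append]
    rcases Nat.lt_or_ge (r + i) n with hlt | hge
    · rw [dif_pos (by omega)]
      have : (i + r) % n = r + i := by rw [Nat.mod_eq_of_lt (by omega)]; omega
      rw [this]
      exact (List.getD_eq_getElem s ' ' (by omega)).symm
    · rw [dif_neg (by omega)]
      have : (i + r) % n = r + i - n := by
        rw [show i + r = r + i by omega, Nat.mod_eq_sub_mod hge, Nat.mod_eq_of_lt (by omega)]
      rw [this]
      exact (List.getD_eq_getElem s ' ' (by omega)).symm
  constructor
  · intro hpre i hi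
    have h1 : s[i]'(by omega) = ((s ++ s).drop r)[i]'(by omega) := hpre.getElem (by omega)
    calc sGet s i = s[i]'(by omega) := List.getD_eq_getElem s ' ' (by omega)
      _ = ((s ++ s).drop r)[i]'(by omega) := h1
      _ = sGet s ((i + r) % n) := elt i hi
  · intro hrot
    rw [List.prefix_iff_eq_take]
    apply List.ext_getElem
    · rw [List.length_take, hlen]; omega
    · intro i h1 h2
      rw [List.getElem_take]
      have hi : i < n := by omega
      rw [elt i hi]
      have := hrot i hi
      rw [← this]
      exact (List.getD_eq_getElem s ' ' (by omega)).symm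

theorem findFrom_eq_minp (s : List Char) (h : s ≠ []) :
    PySem.Chars.findFrom (s ++ s) s 1 = if minp s ∣ s.length then (minp s : Int) else (s.length : Int) := by
  set n := s.length with hndef
  have hn : 0 < n := List.length_pos_of_ne_nil h
  have hlen2 : (s ++ s).length = 2 * n := by simp [hndef]; omega
  have hk : (1 : ℕ) ≤ (s ++ s).length := by omega
  have hone : ((1 : ℕ) : Int) = 1 := by norm_num
  -- the search succeeds: s occurs in (s++s).drop 1 (as a suffix)
  have hne : PySem.Chars.findFrom (s ++ s) s ((1 : ℕ) : Int) ≠ -1 := by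
    rw [Ne, PySem.Chars.findFrom_natCast_eq_neg_one_iff (s ++ s) s 1 hk]
    push_neg
    rw [List.drop_append_of_le_length (by omega)]
    exact List.IsSuffix.isInfix ⟨s.drop 1, rfl⟩
  obtain ⟨hge, hpre, hminl⟩ := PySem.Chars.findFrom_natCast_spec (s ++ s) s 1 hk hne
  set f := PySem.Chars.findFrom (s ++ s) s ((1 : ℕ) : Int) with hfdef
  have hf0 : (0 : Int) ≤ f := le_trans (by norm_num) hge
  set r := f.toNat with hrdef
  have hfr : f = (r : Int) := (Int.toNat_of_nonneg hf0).symm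
  have hr1 : 1 ≤ r := by omega
  have hrn : r ≤ n := by
    have h1 := hpre.length_le
    rw [List.length_drop, hlen2] at h1
    rw [hndef] at h1 ⊢
    omega
  have hrot : RotN s r := (prefix_drop_iff_rot s r hn hrn).1 hpre
  have hmin : ∀ i, 1 ≤ i → i < r → ¬ RotN s i := by
    intro i h1 h2 hri
    exact hminl i h1 h2 ((prefix_drop_iff_rot s i hn (by omega)).2 hri)
  have hno_small : ∀ i, 1 ≤ i → i < minp s → ¬ RotN s i := by
    intro i h1 h2 hri
    have hg := rot_gcd s i hn (by omega) hri
    have hgpos : 0 < Nat.gcd i n := Nat.gcd_pos_of_pos_left n (by omega)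
    have hgle : Nat.gcd i n ≤ i := Nat.gcd_le_left n (by omega)
    have hgn : Nat.gcd i n < n := by
      have := minp_le s
      rw [hndef] at *
      omega
    have := minp_min s (Nat.gcd i n) hgpos (by rw [hndef]; exact hgn) hg
    omega
  have hone' : f = PySem.Chars.findFrom (s ++ s) s 1 := by rw [hfdef, hone]
  by_cases hdvd : minp s ∣ n
  · -- r = minp s
    have hrotm : RotN s (minp s) :=
      rot_of_per_dvd s (minp s) (minp_pos s h) (by rw [← hndef]; exact hdvd) (minp_per s)
    have h1 : r ≤ minp s := by
      by_contra hc
      exact hmin (minp s) (minp_pos s h) (by omega) hrotm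
    have h2 : minp s ≤ r := by
      by_contra hc
      exact hno_small r hr1 (by omega) hrot
    rw [← hone', hfr, if_pos (by rw [hndef] at hdvd; exact hdvd)]
    congr 1
    omega
  · -- r = n
    have h1 : r = n := by
      rcases Nat.lt_or_ge r n with hlt | hge'
      · exfalso
        have hg := rot_gcd s r hn (by omega) hrot
        set g := Nat.gcd r n with hgdef
        have hgpos : 0 < g := Nat.gcd_pos_of_pos_left n (by omega)
        have hgle : g ≤ r := Nat.gcd_le_left n (by omega)
        have hgdvd : g ∣ n := by rw [hgdef]; exact Nat.gcd_dvd_right r n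
        have hmg : minp s ≤ g := minp_min s g hgpos (by rw [← hndef]; omega) hg
        obtain ⟨c, hc⟩ := hgdvd
        have hc2 : 2 ≤ c := by
          rcases Nat.lt_or_ge c 2 with h2 | h2
          · interval_cases c <;> omega
          · exact h2
        have hsum : minp s + g ≤ n := by
          have : 2 * g ≤ g * c := by
            calc 2 * g = g * 2 := by ring
              _ ≤ g * c := Nat.mul_le_mul_left g hc2
          rw [hndef] at *
          omega
        have hfw := perN_gcd s (minp s) g (by rw [← hndef]; omega) (minp_per s) hg
        set g2 := Nat.gcd (minp s) g with hg2def
        have hg2pos : 0 < g2 := Nat.gcd_pos_of_pos_left g (minp_pos s h)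
        have hg2le : g2 ≤ minp s := Nat.gcd_le_left g (minp_pos s h)
        have hg2n : g2 < n := by omega
        have := minp_min s g2 hg2pos (by rw [← hndef]; exact hg2n) hfw
        have hg2 : g2 = minp s := by omega
        have hdg : minp s ∣ g := by rw [← hg2, hg2def]; exact Nat.gcd_dvd_right _ _
        exact hdvd (hdg.trans ⟨c, hc⟩)
      · omega
    rw [← hone', hfr, if_neg hdvd, h1]
  

theorem findFrom_eq_minPeriod (s : List Char) (h : s ≠ []) :
    PySem.Chars.findFrom (s ++ s) s 1 = minPeriod s := by
  rw [findFrom_eq_minp s h, minPeriod_eq_minp s h]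

theorem minPeriod_pos (s : List Char) (h : s ≠ []) : 1 ≤ minPeriod s := by
  rw [minPeriod_eq_minp s h]
  have h1 := minp_pos s h
  have h2 : 0 < s.length := List.length_pos_of_ne_nil h
  split_ifs
  · exact_mod_cast h1
  · exact_mod_cast h2

-- the joined string over the first m indices has the length of the first m words together
theorem sum_len_pyRange (words : List String) (m : Nat) (hm : m ≤ words.length) :
    ((PySem.List.pyRange 0 (m : Int) 1).map
      (fun i => (PySem.List.pyGetD words i "").toList.length)).sum
    = ((words.take m).map (fun w => w.toList.length)).sum := by
  induction m with
  | zero =>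
    rw [show ((0 : Nat) : Int) = 0 by norm_num, PySem.List.pyRange_one_eq_nil (by norm_num)]
    simp
  | succ m ih =>
    have hsplit : PySem.List.pyRange 0 ((m + 1 : Nat) : Int) 1
        = PySem.List.pyRange 0 (m : Int) 1 ++ [(m : Int)] := by
      have h2 := PySem.List.pyRange_one_succ_right (a := 0) (b := (m : Int)) (by positivity)
      push_cast
      exact h2
    rw [hsplit, List.map_append, List.sum_append, ih (by omega), List.take_succ]
    rw [List.getElem?_eq_getElem (by omega : m < words.length)]
    have hget : PySem.List.pyGetD words (m : Int) "" = words[m] := by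
      rw [PySem.List.pyGetD_natCast]
      exact List.getD_eq_getElem words "" (by omega)
    rw [List.map_singleton, List.sum_singleton, hget]
    simp
    rw [List.sum_take_succ (List.map (fun w => w.length) words) m (by simpa using (show m < words.length by omega))]
    simp
    rfl

theorem strlen_sum_cast (l : List String) :
    (l.map (fun w => PySem.Str.len w)).sum = (((l.map (fun w => w.toList.length)).sum : Nat) : Int) := by
  induction l with
  | nil => simp
  | cons w t ih =>
    simp only [List.map_cons, List.sum_cons, PySem.Str.len_eq]
    push_cast [List.map_map]
    rfl

theorem joinWords_ne_nil (words : List String) (N : Int) (perm : List Int)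
    (hmem : perm ∈ PySem.List.permutations (PySem.List.pyRange 0 N 1)
      (PySem.List.pyRange 0 N 1).length)
    (hN0 : 0 ≤ N) (hNle : N ≤ (words.length : Int))
    (hsum : 0 < ((words.take N.toNat).map (fun w => PySem.Str.len w)).sum) :
    joinWords words perm ≠ [] := by
  have hp : perm.Perm (PySem.List.pyRange 0 N 1) := PySem.List.perm_of_mem_permutations hmem
  have hlen : (joinWords words perm).length
      = ((PySem.List.pyRange 0 N 1).map
          (fun i => (PySem.List.pyGetD words i "").toList.length)).sum := by
    unfold joinWords
    rw [List.length_flatten, List.map_map]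
    exact List.Perm.sum_eq (hp.map _)
  have hNcast : (N : Int) = ((N.toNat : Nat) : Int) := by omega
  have hNle' : N.toNat ≤ words.length := by omega
  rw [hNcast, sum_len_pyRange words N.toNat hNle'] at hlen
  rw [strlen_sum_cast] at hsum
  have : 0 < (joinWords words perm).length := by
    rw [hlen]
    exact_mod_cast hsum
  exact List.ne_nil_of_length_pos this

-- ===== VERDICT (by name: the statement is the Claim_ definition above) =====
theorem solve_spec : Claim_equal_solve := by
  intro N words K _ hpre
  unfold Spec_solve solve solve_alt
  dsimp only
  set L : Int := (words.map (fun w => PySem.Str.len w)).sum with hL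
  by_cases hg : (K == 0 || decide (L < K) || !(PySem.Int.mod L K == 0)) = true
  · rw [if_pos hg, if_pos hg]
  · rw [if_neg hg, if_neg hg]
    simp only [Bool.or_eq_true, beq_iff_eq, decide_eq_true_eq, Bool.not_eq_true',
      beq_eq_false_iff_ne, not_or, not_not] at hg
    obtain ⟨hN0, hNle, hsum⟩ : 0 ≤ N ∧ N ≤ (words.length : Int) ∧
        0 < ((words.take N.toNat).map (fun w => PySem.Str.len w)).sum := by
      rcases hpre with h1 | h2
      · exfalso
        obtain ⟨⟨hK0, hLK⟩, hmod⟩ := hg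
        rcases h1 with h | h | h
        · exact hK0 h
        · exact hLK h
        · exact h hmod
      · exact h2
    apply PySem.List.foldl_congr_mem
    intro ans perm hmem
    have hne : joinWords words perm ≠ [] := joinWords_ne_nil words N perm hmem hN0 hNle hsum
    rw [findFrom_eq_minPeriod (joinWords words perm) hne]
    have hpos := minPeriod_pos (joinWords words perm) hne
    have hne1 : (minPeriod (joinWords words perm) == -1) = false := by
      simp only [beq_eq_false_iff_ne]
      omega
    rw [hne1]
    simp only [Bool.false_eq_true, if_false]
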